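-- pv_equiv track=rewrite | github.com/theabbie/leetcode | miscellaneous/Tripling.py | numsubs
-- ===== SOURCE A (Python) =====
-- def numsubs(a, b, c, n):
--     dp = [[[0 for _ in range(n + 1)] for _ in range(n + 1)] for _ in range(n + 1)]
--     for i in range(1, n + 1):
--         for j in range(1, n + 1):
--             for k in range(1, n + 1):
--                 if a[i - 1] == b[j - 1] == c[k - 1]:
--                     dp[i][j][k] = 1 + dp[i - 1][j][k] + dp[i][j - 1][k] + dp[i][j][k - 1]
--                 else:
--                     dp[i][j][k] = dp[i - 1][j][k] + dp[i][j - 1][k] + dp[i][j][k - 1] + dp[i - 1][j - 1][k - 1]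
--     return dp[n][n][n]
-- ===== SOURCE B (Python) =====
-- def numsubs(a, b, c, n):
--     # Top-down memoized recursion on (i, j, k); same recurrence as the DP table,
--     # but computed on demand with a dict cache instead of a bottom-up cube.
--     memo = {}
--
--     def rec(i, j, k):
--         if i <= 0 or j <= 0 or k <= 0:
--             return 0
--         key = (i, j, k)
--         if key in memo:
--             return memo[key]
--         if a[i - 1] == b[j - 1] == c[k - 1]:
--             v = 1 + rec(i - 1, j, k) + rec(i, j - 1, k) + rec(i, j, k - 1)
--         else:
--             v = rec(i - 1, j, k) + rec(i, j - 1, k) + rec(i, j, k - 1) + rec(i - 1, j - 1, k - 1)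
--         memo[key] = v
--         return v
--
--     return rec(n, n, n)
-- ===== Notes on version B (the rewrite author's own statement) =====
-- stated objective: alternative
-- what changed: The bottom-up 3D DP table is replaced by top-down memoized recursion on (i,j,k) with a dict cache, keeping the same recurrence.
import Mathlib
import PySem

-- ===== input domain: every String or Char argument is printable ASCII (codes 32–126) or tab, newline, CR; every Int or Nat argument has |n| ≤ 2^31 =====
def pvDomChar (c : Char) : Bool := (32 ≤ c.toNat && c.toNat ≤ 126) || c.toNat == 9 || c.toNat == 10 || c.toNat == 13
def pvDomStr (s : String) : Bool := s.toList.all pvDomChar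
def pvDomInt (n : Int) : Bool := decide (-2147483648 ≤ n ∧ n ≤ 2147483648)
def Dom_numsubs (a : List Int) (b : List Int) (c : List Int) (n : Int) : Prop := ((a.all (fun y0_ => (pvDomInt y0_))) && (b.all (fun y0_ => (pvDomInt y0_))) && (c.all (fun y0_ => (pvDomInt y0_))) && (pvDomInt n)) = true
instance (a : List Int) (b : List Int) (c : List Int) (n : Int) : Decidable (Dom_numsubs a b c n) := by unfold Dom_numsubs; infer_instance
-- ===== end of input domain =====

-- Port A: bottom-up 3D DP table; port B: top-down memoized recursion on (i,j,k) with a dict cache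
-- (same recurrence, different decomposition; no speed claim).


-- ===== PORT A =====
-- dp[i][j][k] read; Pre_ guarantees the dp indices the loop uses are in range, so the .getD defaults are never hit
def pvG (dp : List (List (List Int))) (i j k : Int) : Int :=
  (PySem.List.pyGet? ((PySem.List.pyGet? ((PySem.List.pyGet? dp i).getD []) j).getD []) k).getD 0

-- dp[i][j][k] = v; i, j, k come from range(1, n+1), hence are nonnegative: .toNat is exact here
def pvSet3 (dp : List (List (List Int))) (i j k : Int) (v : Int) : List (List (List Int)) :=
  dp.modify i.toNat (fun pl => pl.modify j.toNat (fun row => row.set k.toNat v))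

-- a[i-1] read; Pre_ guarantees in range (or the branch where it is read is not taken), default never hit
def pvA (xs : List Int) (i : Int) : Int := (PySem.List.pyGet? xs (i - 1)).getD 0

-- loop body at fixed (i, j), iterating k
def pvBody (a b c : List Int) (i j : Int) (dp : List (List (List Int))) (k : Int) :
    List (List (List Int)) :=
  if pvA a i = pvA b j ∧ pvA b j = pvA c k then
    pvSet3 dp i j k (1 + pvG dp (i-1) j k + pvG dp i (j-1) k + pvG dp i j (k-1))
  else
    pvSet3 dp i j k (pvG dp (i-1) j k + pvG dp i (j-1) k + pvG dp i j (k-1) + pvG dp (i-1) (j-1) (k-1))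

def pvInner (a b c : List Int) (n i j : Int) (dp : List (List (List Int))) : List (List (List Int)) :=
  (PySem.List.pyRange 1 (n+1) 1).foldl (pvBody a b c i j) dp

def pvMiddle (a b c : List Int) (n i : Int) (dp : List (List (List Int))) : List (List (List Int)) :=
  (PySem.List.pyRange 1 (n+1) 1).foldl (fun dp j => pvInner a b c n i j dp) dp

def numsubs (a : List Int) (b : List Int) (c : List Int) (n : Int) : Int :=
  let dp0 : List (List (List Int)) :=
    (PySem.List.pyRange 0 (n+1) 1).map (fun _ =>
      (PySem.List.pyRange 0 (n+1) 1).map (fun _ =>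
        (PySem.List.pyRange 0 (n+1) 1).map (fun _ => (0 : Int))))
  let dp := (PySem.List.pyRange 1 (n+1) 1).foldl (fun dp i => pvMiddle a b c n i dp) dp0
  pvG dp n n n

-- ===== PORT B =====
-- rec(i, j, k) with the dict cache threaded through (Python's mutable memo becomes state
-- passing); fuel is an upper bound on the recursion depth making the recursion structural —
-- with the bound passed below the fuel never runs out, so it adds no behaviour of its own.
def pvRec (a b c : List Int) (fuel : Nat) (memo : PySem.Dict (Int × Int × Int) Int) (i j k : Int) :
    PySem.Dict (Int × Int × Int) Int × Int :=
  match fuel with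
  | 0 => (memo, 0)
  | fuel + 1 =>
    if i ≤ 0 ∨ j ≤ 0 ∨ k ≤ 0 then (memo, 0)
    else
      match memo.get? (i, j, k) with
      | some v => (memo, v)
      | none =>
        let r1 := pvRec a b c fuel memo (i-1) j k
        let r2 := pvRec a b c fuel r1.1 i (j-1) k
        let r3 := pvRec a b c fuel r2.1 i j (k-1)
        if (PySem.List.pyGet? a (i-1)).getD 0 = (PySem.List.pyGet? b (j-1)).getD 0 ∧
           (PySem.List.pyGet? b (j-1)).getD 0 = (PySem.List.pyGet? c (k-1)).getD 0 then
          let v := 1 + r1.2 + r2.2 + r3.2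
          (r3.1.insert (i, j, k) v, v)
        else
          let r4 := pvRec a b c fuel r3.1 (i-1) (j-1) (k-1)
          let v := r1.2 + r2.2 + r3.2 + r4.2
          (r4.1.insert (i, j, k) v, v)

def numsubs_alt (a : List Int) (b : List Int) (c : List Int) (n : Int) : Int :=
  (pvRec a b c (3 * n.toNat + 1) PySem.Dict.empty n n n).2

-- ===== PRECONDITION & SPEC =====
-- Pre_ is exactly where Python A returns: 0 ≤ n and a, b hold at least n elements; c may be shorter
-- only when the first n elements of a and b are disjoint (the chained comparison then short-circuits
-- before reading c, so A never raises).
def Pre_numsubs (a : List Int) (b : List Int) (c : List Int) (n : Int) : Prop :=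
  0 ≤ n ∧ n ≤ a.length ∧ n ≤ b.length ∧
  (n ≤ c.length ∨ ∀ x ∈ a.take n.toNat, x ∉ b.take n.toNat)
instance (a : List Int) (b : List Int) (c : List Int) (n : Int) : Decidable (Pre_numsubs a b c n) := by
  unfold Pre_numsubs; infer_instance

def pvWitness_numsubs : List Int × List Int × List Int × Int := ([1, 2], [1, 3], [1, 2], 2)

def Spec_numsubs (a : List Int) (b : List Int) (c : List Int) (n : Int) (out : Int) : Prop := out = numsubs_alt a b c n
instance (a : List Int) (b : List Int) (c : List Int) (n : Int) (out : Int) : Decidable (Spec_numsubs a b c n out) := by unfold Spec_numsubs; infer_instance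

-- ===== CLAIM (what is proved, stated in full; the proofs are below) =====
def Claim_equal_numsubs : Prop := ∀ (a : List Int) (b : List Int) (c : List Int) (n : Int), Dom_numsubs a b c n → Pre_numsubs a b c n → Spec_numsubs a b c n (numsubs a b c n)


-- ===== LEMMAS AND PROOFS =====

-- the common recurrence, as a pure function (proof-side specification of both ports)
def pvF (a b c : List Int) (i j k : Int) : Int :=
  if i ≤ 0 ∨ j ≤ 0 ∨ k ≤ 0 then 0
  else if (PySem.List.pyGet? a (i-1)).getD 0 = (PySem.List.pyGet? b (j-1)).getD 0 ∧
          (PySem.List.pyGet? b (j-1)).getD 0 = (PySem.List.pyGet? c (k-1)).getD 0 then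
    1 + pvF a b c (i-1) j k + pvF a b c i (j-1) k + pvF a b c i j (k-1)
  else
    pvF a b c (i-1) j k + pvF a b c i (j-1) k + pvF a b c i j (k-1) + pvF a b c (i-1) (j-1) (k-1)
termination_by (i.toNat + j.toNat + k.toNat)
decreasing_by all_goals omega

theorem pvF_base (a b c : List Int) (i j k : Int) (h : i ≤ 0 ∨ j ≤ 0 ∨ k ≤ 0) :
    pvF a b c i j k = 0 := by
  rw [pvF]; simp [h]

-- ---- B side ----
def GoodMemo (a b c : List Int) (memo : PySem.Dict (Int × Int × Int) Int) : Prop :=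
  ∀ p q r v, memo.get? (p, q, r) = some v → v = pvF a b c p q r

theorem pvRec_succ (a b c : List Int) (f : Nat) (memo : PySem.Dict (Int × Int × Int) Int)
    (i j k : Int) :
    pvRec a b c (f + 1) memo i j k =
      if i ≤ 0 ∨ j ≤ 0 ∨ k ≤ 0 then (memo, 0)
      else
        match memo.get? (i, j, k) with
        | some v => (memo, v)
        | none =>
          let r1 := pvRec a b c f memo (i-1) j k
          let r2 := pvRec a b c f r1.1 i (j-1) k
          let r3 := pvRec a b c f r2.1 i j (k-1)
          if (PySem.List.pyGet? a (i-1)).getD 0 = (PySem.List.pyGet? b (j-1)).getD 0 ∧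
             (PySem.List.pyGet? b (j-1)).getD 0 = (PySem.List.pyGet? c (k-1)).getD 0 then
            let v := 1 + r1.2 + r2.2 + r3.2
            (r3.1.insert (i, j, k) v, v)
          else
            let r4 := pvRec a b c f r3.1 (i-1) (j-1) (k-1)
            let v := r1.2 + r2.2 + r3.2 + r4.2
            (r4.1.insert (i, j, k) v, v) := rfl

theorem pvRec_spec (a b c : List Int) (fuel : Nat) :
    ∀ (memo : PySem.Dict (Int × Int × Int) Int) (i j k : Int),
      i.toNat + j.toNat + k.toNat < fuel → GoodMemo a b c memo →
      (pvRec a b c fuel memo i j k).2 = pvF a b c i j k ∧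
        GoodMemo a b c (pvRec a b c fuel memo i j k).1 := by
  induction fuel with
  | zero => intro memo i j k hf h; omega
  | succ f ih =>
    intro memo i j k hf h
    rw [pvRec_succ]
    by_cases hb : i ≤ 0 ∨ j ≤ 0 ∨ k ≤ 0
    · rw [if_pos hb, pvF_base a b c i j k hb]
      exact ⟨rfl, h⟩
    · rw [if_neg hb]
      rcases hv : memo.get? (i, j, k) with _ | w
      · have G1 := ih memo (i-1) j k (by omega) h
        have G2 := ih _ i (j-1) k (by omega) G1.2
        have G3 := ih _ i j (k-1) (by omega) G2.2
        by_cases hc : (PySem.List.pyGet? a (i-1)).getD 0 = (PySem.List.pyGet? b (j-1)).getD 0 ∧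
            (PySem.List.pyGet? b (j-1)).getD 0 = (PySem.List.pyGet? c (k-1)).getD 0
        · rw [if_pos hc]
          have hval : 1 + (pvRec a b c f memo (i-1) j k).2
                + (pvRec a b c f (pvRec a b c f memo (i-1) j k).1 i (j-1) k).2
                + (pvRec a b c f (pvRec a b c f (pvRec a b c f memo (i-1) j k).1 i (j-1) k).1 i j (k-1)).2
              = pvF a b c i j k := by
            rw [G1.1, G2.1, G3.1]
            conv_rhs => rw [pvF]
            rw [if_neg hb, if_pos hc]
          refine ⟨hval, ?_⟩
          intro p q r w hw
          rw [PySem.Dict.get?_insert] at hw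
          by_cases hpq : (p, q, r) = ((i, j, k) : Int × Int × Int)
          · rw [if_pos hpq] at hw
            obtain ⟨hp, hq, hr⟩ : p = i ∧ q = j ∧ r = k := by simpa [Prod.ext_iff] using hpq
            subst hp; subst hq; subst hr
            rw [← hval]
            exact Option.some.inj hw.symm
          · rw [if_neg hpq] at hw
            exact G3.2 p q r w hw
        · rw [if_neg hc]
          have G4 := ih _ (i-1) (j-1) (k-1) (by omega) G3.2
          have hval : (pvRec a b c f memo (i-1) j k).2
                + (pvRec a b c f (pvRec a b c f memo (i-1) j k).1 i (j-1) k).2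
                + (pvRec a b c f (pvRec a b c f (pvRec a b c f memo (i-1) j k).1 i (j-1) k).1 i j (k-1)).2
                + (pvRec a b c f (pvRec a b c f (pvRec a b c f (pvRec a b c f memo (i-1) j k).1 i (j-1) k).1
                    i j (k-1)).1 (i-1) (j-1) (k-1)).2
              = pvF a b c i j k := by
            rw [G1.1, G2.1, G3.1, G4.1]
            conv_rhs => rw [pvF]
            rw [if_neg hb, if_neg hc]
          refine ⟨hval, ?_⟩
          intro p q r w hw
          rw [PySem.Dict.get?_insert] at hw
          by_cases hpq : (p, q, r) = ((i, j, k) : Int × Int × Int)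
          · rw [if_pos hpq] at hw
            obtain ⟨hp, hq, hr⟩ : p = i ∧ q = j ∧ r = k := by simpa [Prod.ext_iff] using hpq
            subst hp; subst hq; subst hr
            rw [← hval]
            exact Option.some.inj hw.symm
          · rw [if_neg hpq] at hw
            exact G4.2 p q r w hw
      · exact ⟨h _ _ _ _ hv, h⟩

-- ---- A side ----
def Cube (dp : List (List (List Int))) (m : Nat) : Prop :=
  dp.length = m ∧ ∀ p q : Nat, p < m → q < m →
    (dp.getD p []).length = m ∧ ((dp.getD p []).getD q []).length = m

abbrev Before (i j k p q r : Int) : Prop :=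
  p < i ∨ (p = i ∧ (q < j ∨ (q = j ∧ r < k)))

def InvA (a b c : List Int) (n : Int) (dp : List (List (List Int))) (i j k : Int) : Prop :=
  Cube dp (n+1).toNat ∧
  ∀ p q r : Int, 0 ≤ p → p ≤ n → 0 ≤ q → q ≤ n → 0 ≤ r → r ≤ n →
    pvG dp p q r = if 1 ≤ p ∧ 1 ≤ q ∧ 1 ≤ r ∧ Before i j k p q r then pvF a b c p q r else 0

theorem getD_modify_lt {α : Type} (l : List α) (i p : Nat) (f : α → α) (d : α) (hp : p < l.length) :
    (l.modify i f).getD p d = if i = p then f (l.getD p d) else l.getD p d := by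
  by_cases h : i = p
  · subst h
    simp [List.getD_eq_getElem?_getD, List.getElem?_eq_getElem hp]
  · simp [List.getD_eq_getElem?_getD, List.getElem?_eq_getElem hp, h]

theorem getD_set_lt {α : Type} (l : List α) (i p : Nat) (v d : α) (hp : p < l.length) :
    (l.set i v).getD p d = if i = p then v else l.getD p d := by
  by_cases h : i = p
  · subst h
    simp [List.getD_eq_getElem?_getD, hp]
  · simp [List.getD_eq_getElem?_getD, List.getElem?_eq_getElem hp, h]

theorem pvG_natCast (dp : List (List (List Int))) (p q r : Nat) :
    pvG dp (p : Int) (q : Int) (r : Int) = ((dp.getD p []).getD q []).getD r 0 := by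
  simp [pvG, List.getD_eq_getElem?_getD]

theorem pvG_eq_nat (dp : List (List (List Int))) (p q r : Int) (hp : 0 ≤ p) (hq : 0 ≤ q) (hr : 0 ≤ r) :
    pvG dp p q r = ((dp.getD p.toNat []).getD q.toNat []).getD r.toNat 0 := by
  rw [← pvG_natCast, Int.toNat_of_nonneg hp, Int.toNat_of_nonneg hq, Int.toNat_of_nonneg hr]

theorem pvSet3_eq_nat (dp : List (List (List Int))) (i j k : Int) (v : Int) :
    pvSet3 dp i j k v = dp.modify i.toNat (fun pl => pl.modify j.toNat (fun row => row.set k.toNat v)) := rfl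

theorem Cube_pvSet3 (dp : List (List (List Int))) (m : Nat) (hC : Cube dp m) (i j k : Int) (v : Int) :
    Cube (pvSet3 dp i j k v) m := by
  obtain ⟨hlen, hin⟩ := hC
  constructor
  · rw [pvSet3_eq_nat, List.length_modify]; exact hlen
  · intro p q hp hq
    have hp' : p < dp.length := by omega
    obtain ⟨h1, h2⟩ := hin p q hp hq
    rw [pvSet3_eq_nat, getD_modify_lt _ _ _ _ _ hp']
    by_cases hip : i.toNat = p
    · rw [if_pos hip]
      have hq' : q < (dp.getD p []).length := by omega
      refine ⟨by rw [List.length_modify]; exact h1, ?_⟩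
      rw [getD_modify_lt _ _ _ _ _ hq']
      by_cases hjq : j.toNat = q
      · rw [if_pos hjq, List.length_set]; exact h2
      · rw [if_neg hjq]; exact h2
    · rw [if_neg hip]; exact ⟨h1, h2⟩

theorem pvG_pvSet3 (dp : List (List (List Int))) (m : Nat) (hC : Cube dp m)
    (i j k p q r : Int) (v : Int)
    (h0i : 0 ≤ i) (h0j : 0 ≤ j) (h0k : 0 ≤ k) (h0p : 0 ≤ p) (h0q : 0 ≤ q) (h0r : 0 ≤ r)
    (_hiM : i < (m : Int)) (_hjM : j < (m : Int)) (_hkM : k < (m : Int))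
    (hpM : p < (m : Int)) (hqM : q < (m : Int)) (hrM : r < (m : Int)) :
    pvG (pvSet3 dp i j k v) p q r = if p = i ∧ q = j ∧ r = k then v else pvG dp p q r := by
  obtain ⟨hlen, hin⟩ := hC
  have hp' : p.toNat < dp.length := by omega
  have hrowlen := (hin p.toNat q.toNat (by omega) (by omega)).1
  have hcelllen := (hin p.toNat q.toNat (by omega) (by omega)).2
  rw [pvG_eq_nat _ _ _ _ h0p h0q h0r, pvG_eq_nat _ _ _ _ h0p h0q h0r, pvSet3_eq_nat,
    getD_modify_lt _ _ _ _ _ hp']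
  by_cases hip : i.toNat = p.toNat
  · rw [if_pos hip,
      getD_modify_lt _ _ _ _ _ (show q.toNat < (dp.getD p.toNat []).length by omega)]
    by_cases hjq : j.toNat = q.toNat
    · rw [if_pos hjq,
        getD_set_lt _ _ _ _ _ (show r.toNat < ((dp.getD p.toNat []).getD q.toNat []).length by omega)]
      by_cases hkr : k.toNat = r.toNat
      · rw [if_pos hkr, if_pos ⟨by omega, by omega, by omega⟩]
      · rw [if_neg hkr, if_neg (by intro hh; exact hkr (by omega))]
    · rw [if_neg hjq, if_neg (by intro hh; exact hjq (by omega))]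
  · rw [if_neg hip, if_neg (by intro hh; exact hip (by omega))]

theorem InvA_init (a b c : List Int) (n : Int) (hn : 0 ≤ n) :
    InvA a b c n
      ((PySem.List.pyRange 0 (n+1) 1).map (fun _ =>
        (PySem.List.pyRange 0 (n+1) 1).map (fun _ =>
          (PySem.List.pyRange 0 (n+1) 1).map (fun _ => (0 : Int))))) 1 1 1 := by
  have hlen : ((PySem.List.pyRange 0 (n+1) 1).map (fun _ : Int =>
      (PySem.List.pyRange 0 (n+1) 1).map (fun _ : Int =>
        (PySem.List.pyRange 0 (n+1) 1).map (fun _ : Int => (0 : Int))))).length = (n+1).toNat := by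
    simp [PySem.List.length_pyRange_one]
  have hget : ∀ p : Nat, p < (n+1).toNat →
      ((PySem.List.pyRange 0 (n+1) 1).map (fun _ : Int =>
        (PySem.List.pyRange 0 (n+1) 1).map (fun _ : Int =>
          (PySem.List.pyRange 0 (n+1) 1).map (fun _ : Int => (0 : Int))))).getD p []
      = (PySem.List.pyRange 0 (n+1) 1).map (fun _ : Int =>
          (PySem.List.pyRange 0 (n+1) 1).map (fun _ : Int => (0 : Int))) := by
    intro p hp
    rw [List.getD_eq_getElem?_getD, List.getElem?_eq_getElem (by simpa [PySem.List.length_pyRange_one] using hp)]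
    simp
  have hget2 : ∀ q : Nat, q < (n+1).toNat →
      ((PySem.List.pyRange 0 (n+1) 1).map (fun _ : Int =>
        (PySem.List.pyRange 0 (n+1) 1).map (fun _ : Int => (0 : Int)))).getD q []
      = (PySem.List.pyRange 0 (n+1) 1).map (fun _ : Int => (0 : Int)) := by
    intro q hq
    rw [List.getD_eq_getElem?_getD, List.getElem?_eq_getElem (by simpa [PySem.List.length_pyRange_one] using hq)]
    simp
  have hget3 : ∀ r : Nat, ((PySem.List.pyRange 0 (n+1) 1).map (fun _ : Int => (0 : Int))).getD r 0 = 0 := by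
    intro r
    rw [List.getD_eq_getElem?_getD]
    rcases h : ((PySem.List.pyRange 0 (n+1) 1).map (fun _ : Int => (0 : Int)))[r]? with _ | x
    · rfl
    · have := List.mem_of_getElem? h
      simp at this
      simp [this]
  constructor
  · refine ⟨hlen, ?_⟩
    intro p q hp hq
    rw [hget p hp]
    constructor
    · simp [PySem.List.length_pyRange_one]
    · rw [hget2 q hq]
      simp [PySem.List.length_pyRange_one]
  · intro p q r h0p hpn h0q hqn h0r hrn
    rw [if_neg (by simp only [Before]; omega)]
    rw [pvG_eq_nat _ _ _ _ h0p h0q h0r, hget p.toNat (by omega), hget2 q.toNat (by omega), hget3]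

theorem InvA_step (a b c : List Int) (n : Int) (dp : List (List (List Int))) (i j k : Int)
    (hi : 1 ≤ i) (hi' : i ≤ n) (hj : 1 ≤ j) (hj' : j ≤ n) (hk : 1 ≤ k) (hk' : k ≤ n)
    (hInv : InvA a b c n dp i j k) :
    InvA a b c n (pvBody a b c i j dp k) i j (k + 1) := by
  obtain ⟨hC, hV⟩ := hInv
  have hread1 : pvG dp (i-1) j k = pvF a b c (i-1) j k := by
    rw [hV (i-1) j k (by omega) (by omega) (by omega) (by omega) (by omega) (by omega)]
    by_cases h0 : 1 ≤ i - 1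
    · rw [if_pos ⟨h0, hj, hk, Or.inl (by omega)⟩]
    · rw [if_neg (by simp only [Before]; omega), pvF_base a b c _ _ _ (by omega)]
  have hread2 : pvG dp i (j-1) k = pvF a b c i (j-1) k := by
    rw [hV i (j-1) k (by omega) (by omega) (by omega) (by omega) (by omega) (by omega)]
    by_cases h0 : 1 ≤ j - 1
    · rw [if_pos ⟨hi, h0, hk, Or.inr ⟨rfl, Or.inl (by omega)⟩⟩]
    · rw [if_neg (by simp only [Before]; omega), pvF_base a b c _ _ _ (by omega)]
  have hread3 : pvG dp i j (k-1) = pvF a b c i j (k-1) := by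
    rw [hV i j (k-1) (by omega) (by omega) (by omega) (by omega) (by omega) (by omega)]
    by_cases h0 : 1 ≤ k - 1
    · rw [if_pos ⟨hi, hj, h0, Or.inr ⟨rfl, Or.inr ⟨rfl, by omega⟩⟩⟩]
    · rw [if_neg (by simp only [Before]; omega), pvF_base a b c _ _ _ (by omega)]
  have hread4 : pvG dp (i-1) (j-1) (k-1) = pvF a b c (i-1) (j-1) (k-1) := by
    rw [hV (i-1) (j-1) (k-1) (by omega) (by omega) (by omega) (by omega) (by omega) (by omega)]
    by_cases h0 : 1 ≤ i - 1 ∧ 1 ≤ j - 1 ∧ 1 ≤ k - 1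
    · rw [if_pos ⟨h0.1, h0.2.1, h0.2.2, Or.inl (by omega)⟩]
    · rw [if_neg (by simp only [Before]; omega), pvF_base a b c _ _ _ (by omega)]
  have hwrite : pvBody a b c i j dp k = pvSet3 dp i j k (pvF a b c i j k) := by
    unfold pvBody
    by_cases hc : pvA a i = pvA b j ∧ pvA b j = pvA c k
    · rw [if_pos hc, hread1, hread2, hread3]
      have hc' : (PySem.List.pyGet? a (i-1)).getD 0 = (PySem.List.pyGet? b (j-1)).getD 0 ∧
          (PySem.List.pyGet? b (j-1)).getD 0 = (PySem.List.pyGet? c (k-1)).getD 0 := hc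
      congr 1
      conv_rhs => rw [pvF]
      rw [if_neg (by omega), if_pos hc']
    · rw [if_neg hc, hread1, hread2, hread3, hread4]
      have hc' : ¬ ((PySem.List.pyGet? a (i-1)).getD 0 = (PySem.List.pyGet? b (j-1)).getD 0 ∧
          (PySem.List.pyGet? b (j-1)).getD 0 = (PySem.List.pyGet? c (k-1)).getD 0) := hc
      congr 1
      conv_rhs => rw [pvF]
      rw [if_neg (by omega), if_neg hc']
  rw [hwrite]
  have hm : ∀ x : Int, 0 ≤ x → x ≤ n → x < (((n+1).toNat : Nat) : Int) := by intro x h1 h2; omega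
  refine ⟨Cube_pvSet3 dp _ hC i j k _, ?_⟩
  intro p q r h0p hpn h0q hqn h0r hrn
  rw [pvG_pvSet3 dp _ hC i j k p q r _ (by omega) (by omega) (by omega) h0p h0q h0r
    (hm i (by omega) hi') (hm j (by omega) hj') (hm k (by omega) hk')
    (hm p h0p hpn) (hm q h0q hqn) (hm r h0r hrn)]
  by_cases hpq : p = i ∧ q = j ∧ r = k
  · rw [if_pos hpq, if_pos ⟨by omega, by omega, by omega, Or.inr ⟨by omega, Or.inr ⟨by omega, by omega⟩⟩⟩]
    rw [hpq.1, hpq.2.1, hpq.2.2]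
  · rw [if_neg hpq, hV p q r h0p hpn h0q hqn h0r hrn]
    by_cases hcnd : 1 ≤ p ∧ 1 ≤ q ∧ 1 ≤ r ∧ Before i j k p q r
    · rw [if_pos hcnd, if_pos ⟨hcnd.1, hcnd.2.1, hcnd.2.2.1, by
        have := hcnd.2.2.2; simp only [Before] at this ⊢; omega⟩]
    · rw [if_neg hcnd, if_neg (by
        intro hh
        exact hcnd ⟨hh.1, hh.2.1, hh.2.2.1, by
          have h4 := hh.2.2.2
          simp only [Before] at h4 ⊢
          omega⟩)]

theorem InvA_inner (a b c : List Int) (n i j : Int)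
    (hi : 1 ≤ i) (hi' : i ≤ n) (hj : 1 ≤ j) (hj' : j ≤ n) :
    ∀ (fuel : Nat) (k0 : Int) (dp : List (List (List Int))), (n + 1 - k0).toNat = fuel →
      1 ≤ k0 → k0 ≤ n + 1 → InvA a b c n dp i j k0 →
      InvA a b c n ((PySem.List.pyRange k0 (n+1) 1).foldl (pvBody a b c i j) dp) i j (n+1) := by
  intro fuel
  induction fuel with
  | zero =>
    intro k0 dp hf h1 h2 hInv
    have hk0 : k0 = n + 1 := by omega
    rw [hk0, PySem.List.pyRange_one_eq_nil (by omega)]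
    simpa [hk0] using hInv
  | succ f ih =>
    intro k0 dp hf h1 h2 hInv
    have hlt : k0 < n + 1 := by omega
    rw [PySem.List.pyRange_one_cons hlt, List.foldl_cons]
    exact ih (k0+1) _ (by omega) (by omega) (by omega)
      (InvA_step a b c n dp i j k0 hi hi' hj hj' h1 (by omega) hInv)

theorem InvA_shift_j (a b c : List Int) (n : Int) (dp : List (List (List Int))) (i j : Int)
    (hInv : InvA a b c n dp i j (n+1)) : InvA a b c n dp i (j+1) 1 := by
  refine ⟨hInv.1, ?_⟩
  intro p q r h0p hpn h0q hqn h0r hrn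
  rw [hInv.2 p q r h0p hpn h0q hqn h0r hrn]
  exact if_congr (by simp only [Before]; omega) rfl rfl

theorem InvA_middle (a b c : List Int) (n i : Int) (hi : 1 ≤ i) (hi' : i ≤ n) :
    ∀ (fuel : Nat) (j0 : Int) (dp : List (List (List Int))), (n + 1 - j0).toNat = fuel →
      1 ≤ j0 → j0 ≤ n + 1 → InvA a b c n dp i j0 1 →
      InvA a b c n ((PySem.List.pyRange j0 (n+1) 1).foldl (fun dp j => pvInner a b c n i j dp) dp) i (n+1) 1 := by
  intro fuel
  induction fuel with
  | zero =>
    intro j0 dp hf h1 h2 hInv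
    have hj0 : j0 = n + 1 := by omega
    rw [hj0, PySem.List.pyRange_one_eq_nil (by omega)]
    simpa [hj0] using hInv
  | succ f ih =>
    intro j0 dp hf h1 h2 hInv
    have hlt : j0 < n + 1 := by omega
    rw [PySem.List.pyRange_one_cons hlt, List.foldl_cons]
    refine ih (j0+1) _ (by omega) (by omega) (by omega) ?_
    exact InvA_shift_j a b c n _ i j0
      (InvA_inner a b c n i j0 hi hi' h1 (by omega) (n + 1 - 1).toNat 1 dp rfl (by omega) (by omega) hInv)

theorem InvA_shift_i (a b c : List Int) (n : Int) (dp : List (List (List Int))) (i : Int)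
    (hInv : InvA a b c n dp i (n+1) 1) : InvA a b c n dp (i+1) 1 1 := by
  refine ⟨hInv.1, ?_⟩
  intro p q r h0p hpn h0q hqn h0r hrn
  rw [hInv.2 p q r h0p hpn h0q hqn h0r hrn]
  exact if_congr (by simp only [Before]; omega) rfl rfl

theorem InvA_outer (a b c : List Int) (n : Int) :
    ∀ (fuel : Nat) (i0 : Int) (dp : List (List (List Int))), (n + 1 - i0).toNat = fuel →
      1 ≤ i0 → i0 ≤ n + 1 → InvA a b c n dp i0 1 1 →
      InvA a b c n ((PySem.List.pyRange i0 (n+1) 1).foldl (fun dp i => pvMiddle a b c n i dp) dp) (n+1) 1 1 := by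
  intro fuel
  induction fuel with
  | zero =>
    intro i0 dp hf h1 h2 hInv
    have hi0 : i0 = n + 1 := by omega
    rw [hi0, PySem.List.pyRange_one_eq_nil (by omega)]
    simpa [hi0] using hInv
  | succ f ih =>
    intro i0 dp hf h1 h2 hInv
    have hlt : i0 < n + 1 := by omega
    rw [PySem.List.pyRange_one_cons hlt, List.foldl_cons]
    refine ih (i0+1) _ (by omega) (by omega) (by omega) ?_
    exact InvA_shift_i a b c n _ i0
      (InvA_middle a b c n i0 h1 (by omega) (n + 1 - 1).toNat 1 dp rfl (by omega) (by omega) hInv)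

theorem numsubs_eq_pvF (a b c : List Int) (n : Int) (hn : 0 ≤ n) :
    numsubs a b c n = pvF a b c n n n := by
  unfold numsubs
  have hfin := InvA_outer a b c n (n + 1 - 1).toNat 1 _ rfl (by omega) (by omega) (InvA_init a b c n hn)
  show pvG ((PySem.List.pyRange 1 (n+1) 1).foldl (fun dp i => pvMiddle a b c n i dp) _) n n n = _
  rw [hfin.2 n n n (by omega) (by omega) (by omega) (by omega) (by omega) (by omega)]
  by_cases h1 : 1 ≤ n
  · rw [if_pos ⟨h1, h1, h1, Or.inl (by omega)⟩]
  · rw [if_neg (by simp only [Before]; omega), pvF_base a b c _ _ _ (by omega)]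

theorem numsubs_alt_eq_pvF (a b c : List Int) (n : Int) :
    numsubs_alt a b c n = pvF a b c n n n := by
  unfold numsubs_alt
  exact (pvRec_spec a b c (3 * n.toNat + 1) PySem.Dict.empty n n n (by omega) (by
    intro p q r v hv
    simp [PySem.Dict.get?_empty] at hv)).1

-- ===== VERDICT (by name: the statement is the Claim_ definition above) =====
theorem numsubs_spec : Claim_equal_numsubs := by
  intro a b c n _ hPre
  show numsubs a b c n = numsubs_alt a b c n
  rw [numsubs_eq_pvF a b c n hPre.1, numsubs_alt_eq_pvF]
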